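-- pv_equiv track=rewrite | github.com/mayflower/padv | padv/eval/integration_assessment.py | matrix_to_gap_list
-- ===== SOURCE A (Python) =====
-- from typing import Any
--
-- def prioritize_gap(requirement_id: str, status: str) -> str:
--     norm_id = requirement_id.strip().upper()
--     norm_status = status.strip().upper()
--     if norm_status == "FULL":
--         return ""
--
--     if norm_id in {"CORE-INFRA", "CORE-ANALYZE", "CORE-RUN"}:
--         return "P1"
--     if norm_id.startswith("CORE-") and norm_status == "FAIL":
--         return "P1"
--     if norm_id.startswith("CORE-"):
--         return "P2"
--     if norm_id.startswith("E"):
--         return "P2"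
--     return "P3"
--
-- def matrix_to_gap_list(matrix: list[dict[str, Any]]) -> list[dict[str, Any]]:
--     out: list[dict[str, Any]] = []
--     for row in matrix:
--         rid = str(row.get("requirement_id", "")).strip()
--         status = str(row.get("status", "FAIL")).strip().upper()
--         if not rid or status == "FULL":
--             continue
--         out.append(
--             {
--                 "priority": prioritize_gap(rid, status),
--                 "requirement_id": rid,
--                 "status": status,
--                 "root_cause": str(row.get("root_cause", "")),
--                 "next_fix": str(row.get("next_fix", "")),
--             }
--         )
--     priority_rank = {"P1": 1, "P2": 2, "P3": 3, "": 9}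
--     out.sort(key=lambda item: (priority_rank.get(item["priority"], 9), item["requirement_id"]))
--     return out
-- ===== SOURCE B (Python) =====
-- def prioritize_gap(requirement_id: str, status: str) -> str:
--     norm_id = requirement_id.strip().upper()
--     norm_status = status.strip().upper()
--     if norm_status == "FULL":
--         return ""
--
--     if norm_id in {"CORE-INFRA", "CORE-ANALYZE", "CORE-RUN"}:
--         return "P1"
--     if norm_id.startswith("CORE-") and norm_status == "FAIL":
--         return "P1"
--     if norm_id.startswith("CORE-"):
--         return "P2"
--     if norm_id.startswith("E"):
--         return "P2"
--     return "P3"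
--
-- def matrix_to_gap_list(matrix):
--     # One pass distributing rows into three priority buckets, then one
--     # plain-string sort per bucket and a concatenation P1 ++ P2 ++ P3:
--     # no tuple sort key and no priority_rank table.
--     p1, p2, p3 = [], [], []
--     for row in matrix:
--         rid = str(row.get("requirement_id", "")).strip()
--         status = str(row.get("status", "FAIL")).strip().upper()
--         if not rid or status == "FULL":
--             continue
--         item = {
--             "priority": prioritize_gap(rid, status),
--             "requirement_id": rid,
--             "status": status,
--             "root_cause": str(row.get("root_cause", "")),
--             "next_fix": str(row.get("next_fix", "")),
--         }
--         if item["priority"] == "P1":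
--             p1.append(item)
--         elif item["priority"] == "P2":
--             p2.append(item)
--         else:
--             p3.append(item)
--     key = lambda g: g["requirement_id"]
--     return sorted(p1, key=key) + sorted(p2, key=key) + sorted(p3, key=key)
-- ===== Notes on version B (the rewrite author's own statement) =====
-- stated objective: alternative
-- what changed: A sorts one flat list with a (priority_rank, requirement_id) tuple key looked up in a rank table; B distributes rows into three priority buckets during the pass, sorts each bucket by requirement_id alone and concatenates P1 ++ P2 ++ P3.
import Mathlib
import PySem

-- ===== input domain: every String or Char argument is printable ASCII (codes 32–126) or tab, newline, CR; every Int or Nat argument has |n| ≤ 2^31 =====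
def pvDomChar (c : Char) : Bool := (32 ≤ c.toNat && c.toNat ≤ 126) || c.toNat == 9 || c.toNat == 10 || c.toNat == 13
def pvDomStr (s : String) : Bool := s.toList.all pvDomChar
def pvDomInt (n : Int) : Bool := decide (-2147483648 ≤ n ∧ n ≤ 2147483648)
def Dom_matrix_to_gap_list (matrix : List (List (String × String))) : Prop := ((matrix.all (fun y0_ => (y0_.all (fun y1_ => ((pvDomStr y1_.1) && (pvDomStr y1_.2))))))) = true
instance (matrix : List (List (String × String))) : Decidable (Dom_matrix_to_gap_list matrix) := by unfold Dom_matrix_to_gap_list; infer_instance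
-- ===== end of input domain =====

-- B replaces A's single sort under a (priority_rank, requirement_id) tuple key by three
-- priority buckets filled in the pass, each sorted by requirement_id alone, concatenated
-- P1 ++ P2 ++ P3 (alternative decomposition, same cost).  A sorts `out` in place and
-- returns it; the equivalence proved here is about the return value.

-- ===== PORT A =====
-- row.get(k, d) on a dict[str, str]; str(...) of a str is the identity.
def pvGetD (row : List (String × String)) (k d : String) : String :=
  PySem.Dict.getD ⟨row⟩ k d

-- module helper prioritize_gap, shared by A and B
def pvPrioritizeGap (requirement_id status : String) : String :=
  let norm_id := PySem.Str.upper (PySem.Str.strip requirement_id)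
  let norm_status := PySem.Str.upper (PySem.Str.strip status)
  if norm_status == "FULL" then ""
  else if ["CORE-INFRA", "CORE-ANALYZE", "CORE-RUN"].contains norm_id then "P1"
  else if PySem.Str.startswith norm_id "CORE-" && norm_status == "FAIL" then "P1"
  else if PySem.Str.startswith norm_id "CORE-" then "P2"
  else if PySem.Str.startswith norm_id "E" then "P2"
  else "P3"

-- rid = str(row.get("requirement_id", "")).strip()
def pvRid (row : List (String × String)) : String :=
  PySem.Str.strip (pvGetD row "requirement_id" "")

-- status = str(row.get("status", "FAIL")).strip().upper()
def pvStatus (row : List (String × String)) : String :=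
  PySem.Str.upper (PySem.Str.strip (pvGetD row "status" "FAIL"))

-- the appended dict literal (both Pythons build the identical dict)
def pvItem (rid status root_cause next_fix : String) : List (String × String) :=
  [("priority", pvPrioritizeGap rid status), ("requirement_id", rid), ("status", status),
   ("root_cause", root_cause), ("next_fix", next_fix)]

def pvRankDict : List (String × Int) := [("P1", 1), ("P2", 2), ("P3", 3), ("", 9)]

def matrix_to_gap_list (matrix : List (List (String × String))) : List (List (String × String)) :=
  let out := matrix.foldl (fun acc row =>
    if pvRid row == "" || pvStatus row == "FULL" then acc
    else acc ++ [pvItem (pvRid row) (pvStatus row) (pvGetD row "root_cause" "") (pvGetD row "next_fix" "")]) []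
  -- item["priority"] / item["requirement_id"]: the keys are always present in the rows
  -- built above, so the total lookup pvGetD is exact here.
  PySem.List.sorted2 out
    (fun item => PySem.Dict.getD ⟨pvRankDict⟩ (pvGetD item "priority" "") 9)
    (fun item => pvGetD item "requirement_id" "")

-- ===== PORT B =====
def pvBKey (g : List (String × String)) : String := pvGetD g "requirement_id" ""

def matrix_to_gap_list_alt (matrix : List (List (String × String))) : List (List (String × String)) :=
  let b := matrix.foldl (fun acc row =>
      if pvRid row == "" || pvStatus row == "FULL" then acc
      else
        let item := pvItem (pvRid row) (pvStatus row) (pvGetD row "root_cause" "") (pvGetD row "next_fix" "")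
        if pvGetD item "priority" "" == "P1" then (acc.1 ++ [item], acc.2.1, acc.2.2)
        else if pvGetD item "priority" "" == "P2" then (acc.1, acc.2.1 ++ [item], acc.2.2)
        else (acc.1, acc.2.1, acc.2.2 ++ [item]))
    (([], [], []) : List (List (String × String)) × List (List (String × String)) × List (List (String × String)))
  PySem.List.sorted b.1 pvBKey ++ PySem.List.sorted b.2.1 pvBKey ++ PySem.List.sorted b.2.2 pvBKey

-- ===== PRECONDITION & SPEC =====
def Spec_matrix_to_gap_list (matrix : List (List (String × String))) (out : List (List (String × String))) : Prop := out = matrix_to_gap_list_alt matrix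
instance (matrix : List (List (String × String))) (out : List (List (String × String))) : Decidable (Spec_matrix_to_gap_list matrix out) := by unfold Spec_matrix_to_gap_list; infer_instance

-- ===== CLAIM (what is proved, stated in full; the proofs are below) =====
def Claim_equal_matrix_to_gap_list : Prop := ∀ (matrix : List (List (String × String))), Dom_matrix_to_gap_list matrix → Spec_matrix_to_gap_list matrix (matrix_to_gap_list matrix)

-- ===== LEMMAS AND PROOFS =====

-- abbreviations for A's two sort keys and the two comparators
def pvK1 (item : List (String × String)) : Int :=
  PySem.Dict.getD ⟨pvRankDict⟩ (pvGetD item "priority" "") 9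

def pvPrio (g : List (String × String)) : String := pvGetD g "priority" ""

def pvKeep (row : List (String × String)) : Bool :=
  !(pvRid row == "" || pvStatus row == "FULL")

def pvRowItem (row : List (String × String)) : List (String × String) :=
  pvItem (pvRid row) (pvStatus row) (pvGetD row "root_cause" "") (pvGetD row "next_fix" "")

def pvLt2 (a b : List (String × String)) : Bool :=
  decide (pvK1 a < pvK1 b) || (!decide (pvK1 b < pvK1 a) && decide (pvBKey a < pvBKey b))

def pvLtK (a b : List (String × String)) : Bool := decide (pvBKey a < pvBKey b)

-- dict-literal lookups on the built item
theorem pvPrio_item (rid status rc nf : String) :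
    pvPrio (pvItem rid status rc nf) = pvPrioritizeGap rid status := by
  simp [pvPrio, pvGetD, pvItem, PySem.Dict.getD, PySem.Dict.get?]

-- ---- upper/strip are idempotent and commute (so pvStatus is already normalized) ----
theorem pv_isspace_upperChar (c : Char) :
    PySem.Chars.isspace (PySem.Chars.upperChar c) = PySem.Chars.isspace c := by
  unfold PySem.Chars.upperChar
  by_cases h : PySem.Chars.islower c = true
  · have h1 : 'a' ≤ c ∧ c ≤ 'z' := by simpa [PySem.Chars.islower] using h
    have hb1 : 97 ≤ c.toNat := h1.1
    have hb2 : c.toNat ≤ 122 := h1.2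
    have hv : (Char.ofNat (c.toNat - 32)).toNat = c.toNat - 32 := by
      unfold Char.ofNat
      rw [dif_pos (by omega)]; rfl
    have hc : PySem.Chars.isspace c = false := by
      simp [PySem.Chars.isspace]; omega
    have hc2 : PySem.Chars.isspace (Char.ofNat (c.toNat - 32)) = false := by
      simp [PySem.Chars.isspace, hv]; omega
    simp [h, hc, hc2]
  · simp [h]

theorem pv_upperChar_upperChar (c : Char) :
    PySem.Chars.upperChar (PySem.Chars.upperChar c) = PySem.Chars.upperChar c := by
  unfold PySem.Chars.upperChar
  by_cases h : PySem.Chars.islower c = true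
  · have h1 : 'a' ≤ c ∧ c ≤ 'z' := by simpa [PySem.Chars.islower] using h
    have hb1 : 97 ≤ c.toNat := h1.1
    have hb2 : c.toNat ≤ 122 := h1.2
    have hv : (Char.ofNat (c.toNat - 32)).toNat = c.toNat - 32 := by
      unfold Char.ofNat
      rw [dif_pos (by omega)]; rfl
    have hlow : PySem.Chars.islower (Char.ofNat (c.toNat - 32)) = false := by
      simp only [PySem.Chars.islower, Bool.and_eq_false_iff, decide_eq_false_iff_not]
      left
      intro hle
      have : (97:Nat) ≤ (Char.ofNat (c.toNat - 32)).toNat := hle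
      omega
    simp [h, hlow]
  · simp [h]

theorem pv_strip_upper_comm (t : List Char) :
    PySem.Chars.strip (PySem.Chars.upper t) = PySem.Chars.upper (PySem.Chars.strip t) := by
  have hf : (PySem.Chars.isspace ∘ PySem.Chars.upperChar) = PySem.Chars.isspace :=
    funext pv_isspace_upperChar
  simp [PySem.Chars.strip, PySem.Chars.lstrip, PySem.Chars.rstrip, PySem.Chars.upper,
    List.dropWhile_map, hf, ← List.map_reverse]

theorem pv_head_dropWhile {p : Char → Bool} {t : List Char} {x : Char} {r : List Char}
    (h : t.dropWhile p = x :: r) : p x = false := by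
  induction t with
  | nil => simp at h
  | cons c t ih =>
    by_cases hc : p c = true
    · rw [List.dropWhile_cons_of_pos hc] at h; exact ih h
    · rw [List.dropWhile_cons_of_neg hc] at h
      cases h; simpa using hc

theorem pv_strip_strip (t : List Char) :
    PySem.Chars.strip (PySem.Chars.strip t) = PySem.Chars.strip t := by
  unfold PySem.Chars.strip
  have hl : PySem.Chars.lstrip (PySem.Chars.rstrip (PySem.Chars.lstrip t))
      = PySem.Chars.rstrip (PySem.Chars.lstrip t) := by
    rcases hh : PySem.Chars.rstrip (PySem.Chars.lstrip t) with _ | ⟨x, xs⟩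
    · simp [PySem.Chars.lstrip]
    · -- rstrip u is a prefix of u := lstrip t, so x heads a dropWhile result
      have hpre : (x :: xs) <+: PySem.Chars.lstrip t := by
        rw [← hh]
        unfold PySem.Chars.rstrip
        exact List.reverse_suffix.mp
          (by simpa using (List.dropWhile_suffix (l := (PySem.Chars.lstrip t).reverse) PySem.Chars.isspace))
      obtain ⟨s, hs⟩ := hpre
      have hx : PySem.Chars.isspace x = false := by
        apply pv_head_dropWhile (p := PySem.Chars.isspace) (t := t)
        simpa [PySem.Chars.lstrip] using hs.symm
      simp only [PySem.Chars.lstrip]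
      rw [List.dropWhile_cons_of_neg (by simp [hx])]
  rw [hl]
  unfold PySem.Chars.rstrip
  simp [List.dropWhile_idempotent]

theorem pv_upper_upper (t : List Char) :
    PySem.Chars.upper (PySem.Chars.upper t) = PySem.Chars.upper t := by
  simp [PySem.Chars.upper, pv_upperChar_upperChar]

theorem pv_str_norm (s : String) :
    PySem.Str.upper (PySem.Str.strip (PySem.Str.upper (PySem.Str.strip s)))
      = PySem.Str.upper (PySem.Str.strip s) := by
  simp only [PySem.Str.upper, PySem.Str.strip, String.toList_ofList]
  rw [pv_strip_upper_comm, pv_strip_strip, pv_upper_upper]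

-- on a kept row the computed priority is one of P1/P2/P3
theorem pv_prio_cases (row : List (String × String)) (h : pvKeep row = true) :
    pvPrioritizeGap (pvRid row) (pvStatus row) = "P1" ∨
    pvPrioritizeGap (pvRid row) (pvStatus row) = "P2" ∨
    pvPrioritizeGap (pvRid row) (pvStatus row) = "P3" := by
  have h2 : pvStatus row ≠ "FULL" := by
    simp [pvKeep] at h; exact h.2
  have hnorm : PySem.Str.upper (PySem.Str.strip (pvStatus row)) = pvStatus row := by
    unfold pvStatus; exact pv_str_norm _
  have hfull : (pvStatus row == "FULL") = false := by simpa using h2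
  unfold pvPrioritizeGap
  simp only [hnorm, hfull, Bool.false_eq_true, if_false]
  split_ifs <;> simp

-- rank-table values
theorem pvK1_of_P1 {g : List (String × String)} (h : pvPrio g = "P1") : pvK1 g = 1 := by
  unfold pvK1; unfold pvPrio at h; rw [h]; decide

theorem pvK1_of_P2 {g : List (String × String)} (h : pvPrio g = "P2") : pvK1 g = 2 := by
  unfold pvK1; unfold pvPrio at h; rw [h]; decide

theorem pvK1_of_P3 {g : List (String × String)} (h : pvPrio g = "P3") : pvK1 g = 3 := by
  unfold pvK1; unfold pvPrio at h; rw [h]; decide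

-- comparator facts
theorem pvLt2_eq_ltK {x y : List (String × String)} (h : pvK1 x = pvK1 y) :
    pvLt2 x y = pvLtK x y := by
  simp [pvLt2, pvLtK, h]

theorem pvLt2_true {x y : List (String × String)} (h : pvK1 x < pvK1 y) :
    pvLt2 x y = true := by
  simp [pvLt2, h]

theorem pvLt2_false {x y : List (String × String)} (h : pvK1 y < pvK1 x) :
    pvLt2 x y = false := by
  have h1 : decide (pvK1 x < pvK1 y) = false := by simp [not_lt_of_gt h]
  have h2 : (!decide (pvK1 y < pvK1 x)) = false := by simp [h]
  simp [pvLt2, h1, h2]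

-- ---- insertion-sort plumbing ----
theorem pv_insertBy_agree {α : Type} (before before' : α → α → Bool) (x : α) (s t : List α)
    (hs : ∀ y ∈ s, before x y = before' x y) (ht : ∀ y ∈ t, before x y = true) :
    PySem.List.insertBy before x (s ++ t) = PySem.List.insertBy before' x s ++ t := by
  induction s with
  | nil =>
    cases t with
    | nil => simp [PySem.List.insertBy]
    | cons y ys => simp [PySem.List.insertBy, ht y (by simp)]
  | cons y ys ih =>
    have hy := hs y (by simp)
    by_cases hb : before x y = true
    · simp [PySem.List.insertBy, ← hy, hb]
    · have hb' : before' x y = false := by rw [← hy]; simpa using hb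
      simp [PySem.List.insertBy, hb, hb', ih (fun z hz => hs z (by simp [hz]))]

theorem pv_insertBy_skip {α : Type} (before : α → α → Bool) (x : α) (s t : List α)
    (hs : ∀ y ∈ s, before x y = false) :
    PySem.List.insertBy before x (s ++ t) = s ++ PySem.List.insertBy before x t := by
  induction s with
  | nil => simp
  | cons y ys ih =>
    simp [PySem.List.insertBy, hs y (by simp), ih (fun z hz => hs z (by simp [hz]))]

-- stable insertion sort under the tuple key = per-bucket insertion sorts, concatenated
theorem pv_bucket_fold (l S1 S2 S3 : List (List (String × String)))
    (hl : ∀ x ∈ l, pvK1 x = 1 ∨ pvK1 x = 2 ∨ pvK1 x = 3)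
    (h1 : ∀ y ∈ S1, pvK1 y = 1) (h2 : ∀ y ∈ S2, pvK1 y = 2) (h3 : ∀ y ∈ S3, pvK1 y = 3) :
    l.foldl (fun acc x => PySem.List.insertBy pvLt2 x acc) (S1 ++ S2 ++ S3)
      = (l.filter (fun x => pvK1 x == 1)).foldl (fun acc x => PySem.List.insertBy pvLtK x acc) S1
        ++ (l.filter (fun x => pvK1 x == 2)).foldl (fun acc x => PySem.List.insertBy pvLtK x acc) S2
        ++ (l.filter (fun x => pvK1 x == 3)).foldl (fun acc x => PySem.List.insertBy pvLtK x acc) S3 := by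
  induction l generalizing S1 S2 S3 with
  | nil => simp
  | cons x l ih =>
    rcases hl x (by simp) with hx | hx | hx
    · have hstep : PySem.List.insertBy pvLt2 x (S1 ++ S2 ++ S3)
          = PySem.List.insertBy pvLtK x S1 ++ S2 ++ S3 := by
        rw [List.append_assoc,
          pv_insertBy_agree pvLt2 pvLtK x S1 (S2 ++ S3)
            (fun y hy => pvLt2_eq_ltK (by rw [hx, h1 y hy]))
            (fun y hy => by
              rcases List.mem_append.mp hy with h | h
              · exact pvLt2_true (by rw [hx, h2 y h]; decide)
              · exact pvLt2_true (by rw [hx, h3 y h]; decide)),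
          ← List.append_assoc]
      rw [List.foldl_cons, hstep,
        ih _ _ _ (fun z hz => hl z (by simp [hz]))
          (fun y hy => by
            rcases (PySem.List.mem_insertBy _ _ _ _).mp hy with rfl | h
            · exact hx
            · exact h1 y h) h2 h3]
      simp [hx]
    · have hstep : PySem.List.insertBy pvLt2 x (S1 ++ S2 ++ S3)
          = S1 ++ PySem.List.insertBy pvLtK x S2 ++ S3 := by
        rw [List.append_assoc,
          pv_insertBy_skip pvLt2 x S1 (S2 ++ S3)
            (fun y hy => pvLt2_false (by rw [hx, h1 y hy]; decide)),
          pv_insertBy_agree pvLt2 pvLtK x S2 S3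
            (fun y hy => pvLt2_eq_ltK (by rw [hx, h2 y hy]))
            (fun y hy => pvLt2_true (by rw [hx, h3 y hy]; decide)),
          ← List.append_assoc]
      rw [List.foldl_cons, hstep,
        ih _ _ _ (fun z hz => hl z (by simp [hz])) h1
          (fun y hy => by
            rcases (PySem.List.mem_insertBy _ _ _ _).mp hy with rfl | h
            · exact hx
            · exact h2 y h) h3]
      simp [hx]
    · have hstep : PySem.List.insertBy pvLt2 x (S1 ++ S2 ++ S3)
          = S1 ++ S2 ++ PySem.List.insertBy pvLtK x S3 := by
        have hskip : ∀ y ∈ S1 ++ S2, pvLt2 x y = false := fun y hy => by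
          rcases List.mem_append.mp hy with h | h
          · exact pvLt2_false (by rw [hx, h1 y h]; decide)
          · exact pvLt2_false (by rw [hx, h2 y h]; decide)
        have hag := pv_insertBy_agree pvLt2 pvLtK x S3 []
          (fun y hy => pvLt2_eq_ltK (by rw [hx, h3 y hy])) (by simp)
        simp only [List.append_nil] at hag
        rw [pv_insertBy_skip pvLt2 x (S1 ++ S2) S3 hskip, hag]
      rw [List.foldl_cons, hstep,
        ih _ _ _ (fun z hz => hl z (by simp [hz])) h1 h2
          (fun y hy => by
            rcases (PySem.List.mem_insertBy _ _ _ _).mp hy with rfl | h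
            · exact hx
            · exact h3 y h)]
      simp [hx]

-- A's append loop, as a filtered map
theorem pv_afold (m : List (List (String × String))) :
    m.foldl (fun acc row =>
      if pvRid row == "" || pvStatus row == "FULL" then acc
      else acc ++ [pvItem (pvRid row) (pvStatus row) (pvGetD row "root_cause" "") (pvGetD row "next_fix" "")]) []
    = ((m.filter pvKeep).map pvRowItem) := by
  have hcongr := PySem.List.foldl_congr_mem
    (l := m) (init := ([] : List (List (String × String))))
    (f := fun acc row =>
      if pvRid row == "" || pvStatus row == "FULL" then acc
      else acc ++ [pvItem (pvRid row) (pvStatus row) (pvGetD row "root_cause" "") (pvGetD row "next_fix" "")])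
    (g := fun acc row => if pvKeep row then acc ++ [pvRowItem row] else acc)
    (fun acc row _ => by
      by_cases hk : (pvRid row == "" || pvStatus row == "FULL") = true <;>
        simp [pvKeep, pvRowItem, hk])
  rw [hcongr, PySem.List.foldl_append_if]
  simp

-- B's bucket loop, as appended filters
theorem pv_bfold (m : List (List (String × String)))
    (a b c : List (List (String × String))) :
    m.foldl (fun acc row =>
      if pvRid row == "" || pvStatus row == "FULL" then acc
      else
        let item := pvItem (pvRid row) (pvStatus row) (pvGetD row "root_cause" "") (pvGetD row "next_fix" "")
        if pvGetD item "priority" "" == "P1" then (acc.1 ++ [item], acc.2.1, acc.2.2)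
        else if pvGetD item "priority" "" == "P2" then (acc.1, acc.2.1 ++ [item], acc.2.2)
        else (acc.1, acc.2.1, acc.2.2 ++ [item])) (a, b, c)
    = (a ++ ((m.filter pvKeep).map pvRowItem).filter (fun g => pvPrio g == "P1"),
       b ++ ((m.filter pvKeep).map pvRowItem).filter (fun g => pvPrio g == "P2"),
       c ++ ((m.filter pvKeep).map pvRowItem).filter
              (fun g => !(pvPrio g == "P1") && !(pvPrio g == "P2"))) := by
  induction m generalizing a b c with
  | nil => simp
  | cons row m ih =>
    by_cases hk : (pvRid row == "" || pvStatus row == "FULL") = true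
    · have hkeep : pvKeep row = false := by simp [pvKeep, hk]
      simp only [List.foldl_cons, hk, if_true, List.filter_cons, hkeep]
      exact ih a b c
    · have hkeep : pvKeep row = true := by simp_all [pvKeep]
      have hgp : pvGetD (pvItem (pvRid row) (pvStatus row) (pvGetD row "root_cause" "") (pvGetD row "next_fix" ""))
          "priority" "" = pvPrioritizeGap (pvRid row) (pvStatus row) := pvPrio_item _ _ _ _
      simp only [List.foldl_cons, hk, if_false, List.filter_cons, hkeep, Bool.false_eq_true, hgp]
      by_cases hp1 : (pvPrioritizeGap (pvRid row) (pvStatus row) == "P1") = true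
      · have hpe : pvPrioritizeGap (pvRid row) (pvStatus row) = "P1" := by simpa using hp1
        simp only [hp1, if_true, ih]
        simp [pvRowItem, pvPrio_item, hpe]
      · by_cases hp2 : (pvPrioritizeGap (pvRid row) (pvStatus row) == "P2") = true
        · have hpe : pvPrioritizeGap (pvRid row) (pvStatus row) = "P2" := by simpa using hp2
          simp only [hp1, hp2, if_true, Bool.false_eq_true, if_false, ih]
          simp [pvRowItem, pvPrio_item, hpe]
        · simp only [hp1, hp2, Bool.false_eq_true, if_false, ih]
          simp [pvRowItem, pvPrio_item, hp1, hp2]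

-- ===== VERDICT (by name: the statement is the Claim_ definition above) =====
theorem matrix_to_gap_list_spec : Claim_equal_matrix_to_gap_list := by
  intro matrix _
  unfold Spec_matrix_to_gap_list
  have hmem : ∀ g ∈ (matrix.filter pvKeep).map pvRowItem,
      pvPrio g = "P1" ∨ pvPrio g = "P2" ∨ pvPrio g = "P3" := by
    intro g hg
    rcases List.mem_map.mp hg with ⟨row, hrow, rfl⟩
    have hkeep : pvKeep row = true := (List.mem_filter.mp hrow).2
    simpa [pvRowItem, pvPrio_item] using pv_prio_cases row hkeep
  have hl : ∀ x ∈ (matrix.filter pvKeep).map pvRowItem,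
      pvK1 x = 1 ∨ pvK1 x = 2 ∨ pvK1 x = 3 := by
    intro x hx
    rcases hmem x hx with h | h | h
    · exact Or.inl (pvK1_of_P1 h)
    · exact Or.inr (Or.inl (pvK1_of_P2 h))
    · exact Or.inr (Or.inr (pvK1_of_P3 h))
  have hA : matrix_to_gap_list matrix
      = List.foldl (fun acc x => PySem.List.insertBy pvLt2 x acc) []
          ((matrix.filter pvKeep).map pvRowItem) := by
    unfold matrix_to_gap_list
    simp only [pv_afold]
    rfl
  have hB : matrix_to_gap_list_alt matrix
      = PySem.List.sorted (((matrix.filter pvKeep).map pvRowItem).filter (fun g => pvPrio g == "P1")) pvBKey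
        ++ PySem.List.sorted (((matrix.filter pvKeep).map pvRowItem).filter (fun g => pvPrio g == "P2")) pvBKey
        ++ PySem.List.sorted (((matrix.filter pvKeep).map pvRowItem).filter
              (fun g => !(pvPrio g == "P1") && !(pvPrio g == "P2"))) pvBKey := by
    unfold matrix_to_gap_list_alt
    simp only [pv_bfold, List.nil_append]
  have hsK : ∀ l : List (List (String × String)),
      PySem.List.sorted l pvBKey
        = l.foldl (fun acc x => PySem.List.insertBy pvLtK x acc) [] := fun l =>
    PySem.List.sorted_eq_foldl_insertBy l pvBKey
  have hf1 : ((matrix.filter pvKeep).map pvRowItem).filter (fun x => pvK1 x == 1)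
      = ((matrix.filter pvKeep).map pvRowItem).filter (fun g => pvPrio g == "P1") :=
    List.filter_congr (fun x hx => by
      rcases hmem x hx with h | h | h
      · simp [h, pvK1_of_P1 h]
      · simp [h, pvK1_of_P2 h]
      · simp [h, pvK1_of_P3 h])
  have hf2 : ((matrix.filter pvKeep).map pvRowItem).filter (fun x => pvK1 x == 2)
      = ((matrix.filter pvKeep).map pvRowItem).filter (fun g => pvPrio g == "P2") :=
    List.filter_congr (fun x hx => by
      rcases hmem x hx with h | h | h
      · simp [h, pvK1_of_P1 h]
      · simp [h, pvK1_of_P2 h]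
      · simp [h, pvK1_of_P3 h])
  have hf3 : ((matrix.filter pvKeep).map pvRowItem).filter (fun x => pvK1 x == 3)
      = ((matrix.filter pvKeep).map pvRowItem).filter
          (fun g => !(pvPrio g == "P1") && !(pvPrio g == "P2")) :=
    List.filter_congr (fun x hx => by
      rcases hmem x hx with h | h | h
      · simp [h, pvK1_of_P1 h]
      · simp [h, pvK1_of_P2 h]
      · simp [h, pvK1_of_P3 h])
  rw [hA, hB, hsK, hsK, hsK, ← hf1, ← hf2, ← hf3,
    ← pv_bucket_fold _ [] [] [] hl (by simp) (by simp) (by simp)]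
  rfl
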